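-- pv_equiv track=rewrite | github.com/willasbery/vision-assist | utilities/generate_testing_grids/utility.py | get_affected_cells
-- ===== SOURCE A (Python) =====
-- def get_affected_cells(grid_x, grid_y, brush_size, grid_shape, grid_size):
--     cells = []
--     offset = brush_size // 2
--
--     grid_index_x = grid_x // grid_size
--     grid_index_y = grid_y // grid_size
--
--     for dy in range(-offset, offset + 1):
--         for dx in range(-offset, offset + 1):
--             new_x = grid_index_x + dx
--             new_y = grid_index_y + dy
--             if (0 <= new_x < grid_shape[1] and 0 <= new_y < grid_shape[0]):
--                 cells.append((new_x, new_y))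
--
--     return cells
-- ===== SOURCE B (Python) =====
-- def get_affected_cells(grid_x, grid_y, brush_size, grid_shape, grid_size):
--     offset = brush_size // 2
--     gx = grid_x // grid_size
--     gy = grid_y // grid_size
--     x_lo = max(0, gx - offset)
--     x_hi = min(grid_shape[1] - 1, gx + offset)
--     y_lo = max(0, gy - offset)
--     y_hi = min(grid_shape[0] - 1, gy + offset)
--     w = x_hi - x_lo + 1
--     h = y_hi - y_lo + 1
--     if w <= 0 or h <= 0:
--         return []
--     return [(x_lo + k % w, y_lo + k // w) for k in range(w * h)]
-- ===== Notes on version B (the rewrite author's own statement) =====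
-- stated objective: alternative
-- what changed: B clamps the brush square to the grid once, then enumerates the intersection rectangle with a SINGLE flat loop over range(w*h), decoding each index k into a cell (x_lo + k% w, y_lo + k// w) by divmod arithmetic -- no nested loops and no per-cell bounds test.
import Mathlib
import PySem

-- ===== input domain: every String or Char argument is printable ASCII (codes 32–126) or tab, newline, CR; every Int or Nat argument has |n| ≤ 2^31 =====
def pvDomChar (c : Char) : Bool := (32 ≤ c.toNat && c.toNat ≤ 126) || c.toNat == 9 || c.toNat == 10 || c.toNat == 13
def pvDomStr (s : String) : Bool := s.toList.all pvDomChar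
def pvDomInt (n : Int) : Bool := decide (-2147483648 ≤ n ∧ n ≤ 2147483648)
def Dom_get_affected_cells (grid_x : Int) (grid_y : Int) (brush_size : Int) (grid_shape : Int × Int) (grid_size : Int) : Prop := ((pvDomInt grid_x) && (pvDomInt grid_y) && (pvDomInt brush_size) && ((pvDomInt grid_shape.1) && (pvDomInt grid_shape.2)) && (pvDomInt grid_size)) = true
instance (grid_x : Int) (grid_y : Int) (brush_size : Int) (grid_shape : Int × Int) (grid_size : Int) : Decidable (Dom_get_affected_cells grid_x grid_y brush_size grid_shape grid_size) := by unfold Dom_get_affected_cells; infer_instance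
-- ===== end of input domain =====

-- B clamps the brush square to the grid once and enumerates the intersection rectangle with ONE flat
-- loop over range(w*h), decoding each index by divmod — no nested loops and no per-cell bounds test.

-- ===== PORT A =====
def get_affected_cells (grid_x : Int) (grid_y : Int) (brush_size : Int) (grid_shape : Int × Int) (grid_size : Int) : List (Int × Int) :=
  let offset := PySem.Int.floordiv brush_size 2
  let grid_index_x := PySem.Int.floordiv grid_x grid_size
  let grid_index_y := PySem.Int.floordiv grid_y grid_size
  (PySem.List.pyRange (-offset) (offset + 1) 1).foldl (fun cells dy =>
    (PySem.List.pyRange (-offset) (offset + 1) 1).foldl (fun cells dx =>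
      let new_x := grid_index_x + dx
      let new_y := grid_index_y + dy
      if 0 ≤ new_x ∧ new_x < grid_shape.2 ∧ 0 ≤ new_y ∧ new_y < grid_shape.1 then
        cells ++ [(new_x, new_y)]
      else cells) cells) []

-- ===== PORT B =====
def get_affected_cells_alt (grid_x : Int) (grid_y : Int) (brush_size : Int) (grid_shape : Int × Int) (grid_size : Int) : List (Int × Int) :=
  let offset := PySem.Int.floordiv brush_size 2
  let gx := PySem.Int.floordiv grid_x grid_size
  let gy := PySem.Int.floordiv grid_y grid_size
  let x_lo := max 0 (gx - offset)
  let x_hi := min (grid_shape.2 - 1) (gx + offset)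
  let y_lo := max 0 (gy - offset)
  let y_hi := min (grid_shape.1 - 1) (gy + offset)
  let w := x_hi - x_lo + 1
  let h := y_hi - y_lo + 1
  if w ≤ 0 ∨ h ≤ 0 then []
  else (PySem.List.pyRange 0 (w * h) 1).map (fun k =>
    (x_lo + PySem.Int.mod k w, y_lo + PySem.Int.floordiv k w))

-- ===== PRECONDITION & SPEC =====
-- Pre_ excludes grid_size = 0, on which A raises ZeroDivisionError (B raises too).
def Pre_get_affected_cells (grid_x : Int) (grid_y : Int) (brush_size : Int) (grid_shape : Int × Int) (grid_size : Int) : Prop := grid_size ≠ 0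
instance (grid_x : Int) (grid_y : Int) (brush_size : Int) (grid_shape : Int × Int) (grid_size : Int) : Decidable (Pre_get_affected_cells grid_x grid_y brush_size grid_shape grid_size) := by unfold Pre_get_affected_cells; infer_instance
def pvWitness_get_affected_cells : Int × Int × Int × (Int × Int) × Int := (10, 10, 3, (5, 5), 8)

def Spec_get_affected_cells (grid_x : Int) (grid_y : Int) (brush_size : Int) (grid_shape : Int × Int) (grid_size : Int) (out : List (Int × Int)) : Prop := out = get_affected_cells_alt grid_x grid_y brush_size grid_shape grid_size
instance (grid_x : Int) (grid_y : Int) (brush_size : Int) (grid_shape : Int × Int) (grid_size : Int) (out : List (Int × Int)) : Decidable (Spec_get_affected_cells grid_x grid_y brush_size grid_shape grid_size out) := by unfold Spec_get_affected_cells; infer_instance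

-- ===== CLAIM (what is proved, stated in full; the proofs are below) =====
def Claim_equal_get_affected_cells : Prop := ∀ (grid_x : Int) (grid_y : Int) (brush_size : Int) (grid_shape : Int × Int) (grid_size : Int), Dom_get_affected_cells grid_x grid_y brush_size grid_shape grid_size → Pre_get_affected_cells grid_x grid_y brush_size grid_shape grid_size → Spec_get_affected_cells grid_x grid_y brush_size grid_shape grid_size (get_affected_cells grid_x grid_y brush_size grid_shape grid_size)

-- ===== LEMMAS AND PROOFS =====

-- foldl over a range that conditionally appends g (c+d) equals flatMap of g over the clamped shifted range
theorem pv_filt_flat {α : Type} (c lo hi : Int) (g : Int → List α) :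
    ∀ (n : Nat) (a b : Int), (b - a).toNat = n → ∀ (init : List α),
      (PySem.List.pyRange a b 1).foldl
        (fun acc d => if lo ≤ c + d ∧ c + d < hi then acc ++ g (c + d) else acc) init
      = init ++ (PySem.List.pyRange (max lo (c + a)) (min hi (c + b)) 1).flatMap g := by
  intro n
  induction n with
  | zero =>
    intro a b h init
    rw [PySem.List.pyRange_one_eq_nil (by omega : b ≤ a),
        PySem.List.pyRange_one_eq_nil (by omega : min hi (c + b) ≤ max lo (c + a))]
    simp
  | succ n ih =>
    intro a b h init
    have hab : a < b := by omega
    rw [PySem.List.pyRange_one_cons hab]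
    simp only [List.foldl_cons]
    by_cases hc : lo ≤ c + a ∧ c + a < hi
    · rw [if_pos hc, ih (a + 1) b (by omega)]
      have h1 : max lo (c + a) = c + a := by omega
      have h2 : max lo (c + (a + 1)) = c + a + 1 := by omega
      have h3 : c + a < min hi (c + b) := by omega
      rw [h1, h2, PySem.List.pyRange_one_cons h3]
      simp [List.append_assoc]
    · rw [if_neg hc, ih (a + 1) b (by omega)]
      congr 2
      by_cases h0 : c + a < lo
      · congr 1; omega
      · rw [PySem.List.pyRange_one_eq_nil (by omega),
            PySem.List.pyRange_one_eq_nil (by omega)]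

theorem pv_foldl_fixed {α β : Type} (l : List β) (init : α) :
    l.foldl (fun acc _ => acc) init = init := by
  induction l <;> simp_all

-- A's inner loop, for a fixed dy, produces the clamped x-row (or nothing when y is out of bounds)
theorem pv_inner (off gix W : Int) (ny : Int) (H : Int) (init : List (Int × Int)) :
    (PySem.List.pyRange (-off) (off + 1) 1).foldl (fun cells dx =>
        if 0 ≤ gix + dx ∧ gix + dx < W ∧ 0 ≤ ny ∧ ny < H then
          cells ++ [(gix + dx, ny)]
        else cells) init
    = init ++ (if 0 ≤ ny ∧ ny < H then
        (PySem.List.pyRange (max 0 (gix + -off)) (min W (gix + (off + 1))) 1).map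
          (fun x => (x, ny))
      else []) := by
  by_cases hq : 0 ≤ ny ∧ ny < H
  · rw [if_pos hq]
    have feq : (fun (cells : List (Int × Int)) dx =>
        if 0 ≤ gix + dx ∧ gix + dx < W ∧ 0 ≤ ny ∧ ny < H then
          cells ++ [(gix + dx, ny)] else cells)
        = (fun cells dx =>
        if (0:Int) ≤ gix + dx ∧ gix + dx < W then
          cells ++ [(gix + dx, ny)] else cells) := by
      funext cells dx
      by_cases hx : (0:Int) ≤ gix + dx ∧ gix + dx < W
      · rw [if_pos ⟨hx.1, hx.2, hq⟩, if_pos hx]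
      · rw [if_neg (fun h => hx ⟨h.1, h.2.1⟩), if_neg hx]
    rw [feq, pv_filt_flat gix 0 W (fun x => [(x, ny)]) _ (-off) (off + 1) rfl init]
    congr 1
    exact List.map_eq_flatMap.symm
  · rw [if_neg hq]
    have feq : (fun (cells : List (Int × Int)) (dx : Int) =>
        if 0 ≤ gix + dx ∧ gix + dx < W ∧ 0 ≤ ny ∧ ny < H then
          cells ++ [(gix + dx, ny)] else cells)
        = (fun cells _ => cells) := by
      funext cells dx
      exact if_neg (fun h => hq ⟨h.2.2.1, h.2.2.2⟩)
    rw [feq, pv_foldl_fixed]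
    simp

-- shifting an integer range
theorem pv_range_shift (a b c : Int) :
    PySem.List.pyRange (a + c) (b + c) 1 = (PySem.List.pyRange a b 1).map (· + c) := by
  rw [PySem.List.pyRange_one, PySem.List.pyRange_one]
  have : (b + c - (a + c)).toNat = (b - a).toNat := by omega
  rw [this, List.map_map]
  exact List.map_congr_left (fun k _ => by simp; ring)

-- flattening the rectangle: row-by-row flatMap equals a single divmod-decoded range
theorem pv_flatten (w x0 : Int) (hw : 0 < w) :
    ∀ (n : Nat) (y0 : Int),
      (PySem.List.pyRange y0 (y0 + n) 1).flatMap (fun y =>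
        (PySem.List.pyRange x0 (x0 + w) 1).map (fun x => (x, y)))
      = (PySem.List.pyRange 0 (w * n) 1).map (fun k =>
          (x0 + PySem.Int.mod k w, y0 + PySem.Int.floordiv k w)) := by
  intro n
  induction n with
  | zero =>
    intro y0
    rw [PySem.List.pyRange_one_eq_nil (a := y0) (by simp),
        PySem.List.pyRange_one_eq_nil (a := 0) (b := w * ((0:Nat):Int)) (by simp)]
    simp
  | succ n ih =>
    intro y0
    have hcast : ((n : Int) + 1) = ((n + 1 : Nat) : Int) := by push_cast; ring
    rw [← hcast]
    have h1 : y0 < y0 + ((n : Int) + 1) := by omega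
    rw [show y0 + ((n : Int) + 1) = (y0 + 1) + (n : Int) by ring,
        PySem.List.pyRange_one_cons (by omega : y0 < (y0 + 1) + (n : Int))]
    rw [List.flatMap_cons, ih (y0 + 1)]
    -- split RHS range at w
    have hsplit : PySem.List.pyRange 0 (w * ((n : Int) + 1)) 1
        = PySem.List.pyRange 0 w 1 ++ PySem.List.pyRange w (w * ((n : Int) + 1)) 1 :=
      PySem.List.pyRange_one_append 0 w _ (by omega) (by nlinarith [Int.natCast_nonneg n])
    rw [hsplit, List.map_append]
    congr 1
    · -- first row
      have hx : PySem.List.pyRange x0 (x0 + w) 1 = (PySem.List.pyRange 0 w 1).map (· + x0) := by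
        have h0 := pv_range_shift 0 w x0
        rw [show (0:Int) + x0 = x0 by ring, show w + x0 = x0 + w by ring] at h0
        exact h0
      rw [hx, List.map_map]
      refine List.map_congr_left (fun k hk => ?_)
      have hk' := (PySem.List.mem_pyRange_one).1 hk
      have hm : PySem.Int.mod k w = k := by
        rw [PySem.Int.mod_eq_emod_of_pos hw]; exact Int.emod_eq_of_lt hk'.1 hk'.2
      have hd : PySem.Int.floordiv k w = 0 := by
        rw [PySem.Int.floordiv_eq_ediv_of_pos hw]; exact Int.ediv_eq_zero_of_lt hk'.1 hk'.2
      simp [hm, hd]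
      ring
    · -- remaining rows: shift indices by w
      have hr : PySem.List.pyRange w (w * ((n:Int) + 1)) 1
          = (PySem.List.pyRange 0 (w * (n:Int)) 1).map (· + w) := by
        have := pv_range_shift 0 (w * (n:Int)) w
        rw [show (0:Int) + w = w by ring, show w * (n:Int) + w = w * ((n:Int) + 1) by ring] at this
        exact this
      rw [hr, List.map_map]
      refine List.map_congr_left (fun j _ => ?_)
      have hm : PySem.Int.mod (j + w) w = PySem.Int.mod j w := by
        rw [PySem.Int.mod_eq_emod_of_pos hw, PySem.Int.mod_eq_emod_of_pos hw]
        simp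
      have hd : PySem.Int.floordiv (j + w) w = PySem.Int.floordiv j w + 1 := by
        rw [PySem.Int.floordiv_eq_ediv_of_pos hw, PySem.Int.floordiv_eq_ediv_of_pos hw]
        simpa using Int.add_mul_ediv_right j 1 (by omega : w ≠ 0)
      simp [hm, hd]
      ring

-- ===== VERDICT (by name: the statement is the Claim_ definition above) =====
theorem get_affected_cells_spec : Claim_equal_get_affected_cells := by
  intro grid_x grid_y brush_size grid_shape grid_size _ _
  unfold Spec_get_affected_cells get_affected_cells get_affected_cells_alt
  set off := PySem.Int.floordiv brush_size 2 with hoff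
  set gx := PySem.Int.floordiv grid_x grid_size with hgx
  set gy := PySem.Int.floordiv grid_y grid_size with hgy
  simp only []
  have houter : (fun (cells : List (Int × Int)) dy =>
      (PySem.List.pyRange (-off) (off + 1) 1).foldl (fun cells dx =>
        if 0 ≤ gx + dx ∧ gx + dx < grid_shape.2 ∧ 0 ≤ gy + dy ∧ gy + dy < grid_shape.1 then
          cells ++ [(gx + dx, gy + dy)]
        else cells) cells)
      = (fun cells dy =>
        if (0:Int) ≤ gy + dy ∧ gy + dy < grid_shape.1 then
          cells ++ ((PySem.List.pyRange (max 0 (gx + -off)) (min grid_shape.2 (gx + (off + 1))) 1).map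
            (fun x => (x, gy + dy)))
        else cells) := by
    funext cells dy
    rw [pv_inner off gx grid_shape.2 (gy + dy) grid_shape.1 cells]
    by_cases hq : (0:Int) ≤ gy + dy ∧ gy + dy < grid_shape.1
    · rw [if_pos hq, if_pos hq]
    · rw [if_neg hq, if_neg hq, List.append_nil]
  rw [houter,
      pv_filt_flat gy 0 grid_shape.1
        (fun y => (PySem.List.pyRange (max 0 (gx + -off)) (min grid_shape.2 (gx + (off + 1))) 1).map
          (fun x => (x, y))) _ (-off) (off + 1) rfl []]
  rw [List.nil_append]
  set x_lo := max 0 (gx - off) with hxlo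
  set x_hi := min (grid_shape.2 - 1) (gx + off) with hxhi
  set y_lo := max 0 (gy - off) with hylo
  set y_hi := min (grid_shape.1 - 1) (gy + off) with hyhi
  have hy1 : max 0 (gy + -off) = y_lo := by rw [hylo]; omega
  have hy2 : min grid_shape.1 (gy + (off + 1)) = y_hi + 1 := by rw [hyhi]; omega
  have hx1 : max 0 (gx + -off) = x_lo := by rw [hxlo]; omega
  have hx2 : min grid_shape.2 (gx + (off + 1)) = x_hi + 1 := by rw [hxhi]; omega
  rw [hy1, hy2, hx1, hx2]
  set w := x_hi - x_lo + 1 with hw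
  set h := y_hi - y_lo + 1 with hh
  by_cases hdeg : w ≤ 0 ∨ h ≤ 0
  · rw [if_pos hdeg]
    rcases hdeg with hw0 | hh0
    · -- each row is empty
      refine List.flatMap_eq_nil_iff.2 (fun y _ => ?_)
      rw [PySem.List.pyRange_one_eq_nil (by omega)]
      simp
    · rw [PySem.List.pyRange_one_eq_nil (a := y_lo) (by omega)]
      simp
  · rw [if_neg hdeg]
    have hwpos : 0 < w := by omega
    have hhpos : 0 < h := by omega
    have hn : h = ((h.toNat : Nat) : Int) := by omega
    have := pv_flatten w x_lo hwpos h.toNat y_lo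
    rw [show y_lo + (h.toNat : Int) = y_hi + 1 by omega,
        show x_lo + w = x_hi + 1 by omega,
        show w * (h.toNat : Int) = w * h by rw [← hn]] at this
    exact this
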